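-- pv_equiv track=rewrite | github.com/rybinai/Some-labs-from-university | AlgorithmsAndDataStructures/3lab/s2.py | find_longest_retrostroke
-- ===== SOURCE A (Python) =====
-- def prefix_function(s):
--     n = len(s)
--     pi = [0] * n
--     for i in range(1, n):
--         j = pi[i - 1]
--         while j > 0 and s[i] != s[j]:
--             j = pi[j - 1]
--         if s[i] == s[j]:
--             j += 1
--         pi[i] = j
--     return pi
--
-- def find_longest_retrostroke(s):
--     n = len(s)
--     pi = prefix_function(s)
--
--     for k in range(n, 0, -1):
--         repeat_count = 0
--         j = pi[k - 1]
--         while j > 0: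
--             repeat_count += 1
--             j = pi[j - 1]
--
--         if repeat_count < pi[k - 1]:
--             return s[:k]
--
--     return ""
-- ===== SOURCE B (Python) =====
-- def find_longest_retrostroke(s):
--     if not s:
--         return ""
--     pi = [0]
--     g = [0]          # g[i] = length of the border chain pi[i], pi[pi[i]-1], ... (DP, no rescans)
--     best = 0
--     for i in range(1, len(s)):
--         j = pi[-1]
--         while j > 0 and s[i] != s[j]:
--             j = pi[j - 1]
--         if s[i] == s[j]:
--             j += 1
--         pi.append(j)
--         g.append(1 + g[j - 1] if j > 0 else 0)
--         if g[i] < j: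
--             best = i + 1
--     return s[:best]
-- ===== Notes on version B (the rewrite author's own statement) =====
-- stated objective: faster
-- what changed: Instead of rescanning the whole border chain with an inner while loop for every candidate prefix length k (scanned backwards), B computes the chain length g[i] = 1 + g[pi[i]-1] by dynamic programming while building the prefix function in one forward pass and keeps the largest k with g[k-1] < pi[k-1], so the quadratic rescan disappears.
import Mathlib
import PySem

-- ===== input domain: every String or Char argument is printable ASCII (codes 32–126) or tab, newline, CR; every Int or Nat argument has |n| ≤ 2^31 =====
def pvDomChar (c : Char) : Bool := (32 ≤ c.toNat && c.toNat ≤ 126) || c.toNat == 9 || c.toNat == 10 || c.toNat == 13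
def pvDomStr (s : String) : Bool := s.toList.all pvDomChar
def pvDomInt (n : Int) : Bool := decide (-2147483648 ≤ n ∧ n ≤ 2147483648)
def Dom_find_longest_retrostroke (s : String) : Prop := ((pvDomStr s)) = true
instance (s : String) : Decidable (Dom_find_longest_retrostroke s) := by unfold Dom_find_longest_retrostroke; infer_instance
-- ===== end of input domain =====

-- B replaces A's per-k rescan of the border chain by a DP table g (g[i] = 1 + g[pi[i]-1]) filled
-- during one forward pass that also builds the prefix function (objective: faster; measurably so).

-- ===== PORT A =====
-- the inner `while j > 0 and s[i] != s[j]: j = pi[j-1]` of prefix_function (fuel only makes it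
-- total; cs.length steps always suffice since j strictly decreases while nonnegative)
def pvChase (cs : List Char) (pi : List Int) (i : Int) : Nat → Int → Int
  | 0, j => j
  | f + 1, j =>
    if j > 0 ∧ PySem.List.pyGetD cs i ' ' ≠ PySem.List.pyGetD cs j ' ' then
      pvChase cs pi i f (PySem.List.pyGetD pi (j - 1) 0)
    else j

-- prefix_function(s)
def pvPrefixFun (cs : List Char) : List Int :=
  (PySem.List.pyRange 1 (cs.length : Int) 1).foldl
    (fun pi i =>
      let j0 := PySem.List.pyGetD pi (i - 1) 0
      let j1 := pvChase cs pi i cs.length j0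
      let j := if PySem.List.pyGetD cs i ' ' = PySem.List.pyGetD cs j1 ' ' then j1 + 1 else j1
      PySem.List.pySetD pi i j)
    (List.replicate cs.length 0)

-- the inner `while j > 0: repeat_count += 1; j = pi[j-1]` (fuel = pi.length suffices, same reason)
def pvChainA (pi : List Int) : Nat → Int → Int → Int
  | 0, rc, _ => rc
  | f + 1, rc, j =>
    if j > 0 then pvChainA pi f (rc + 1) (PySem.List.pyGetD pi (j - 1) 0) else rc

-- `for k in range(n, 0, -1): …` with early return; argument k here is Python's k
def pvLoopA (cs : List Char) (pi : List Int) : Nat → List Char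
  | 0 => []
  | k + 1 =>
    let rc := pvChainA pi pi.length 0 (PySem.List.pyGetD pi (k : Int) 0)
    if rc < PySem.List.pyGetD pi (k : Int) 0 then
      PySem.List.slice cs none (some ((k : Int) + 1))
    else pvLoopA cs pi k

def find_longest_retrostroke (s : String) : String :=
  let cs := s.toList
  String.ofList (pvLoopA cs (pvPrefixFun cs) cs.length)

-- ===== PORT B =====
-- one iteration of Source B's single forward loop: state (pi, g, best), lists built by append
def pvStepB (cs : List Char) (st : List Int × List Int × Int) (i : Int) : List Int × List Int × Int :=
  let pi := st.1
  let g := st.2.1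
  let best := st.2.2
  let j0 := PySem.List.pyGetD pi (-1) 0
  let j1 := pvChase cs pi i cs.length j0
  let j := if PySem.List.pyGetD cs i ' ' = PySem.List.pyGetD cs j1 ' ' then j1 + 1 else j1
  let pi' := pi ++ [j]
  let g' := g ++ [if j > 0 then 1 + PySem.List.pyGetD g (j - 1) 0 else 0]
  let best' := if PySem.List.pyGetD g' i 0 < j then i + 1 else best
  (pi', g', best')

def find_longest_retrostroke_alt (s : String) : String :=
  let cs := s.toList
  if cs.isEmpty then "" else
    let st := (PySem.List.pyRange 1 (cs.length : Int) 1).foldl (pvStepB cs) ([0], [0], 0)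
    String.ofList (PySem.List.slice cs none (some st.2.2))

-- ===== PRECONDITION & SPEC =====
def Spec_find_longest_retrostroke (s : String) (out : String) : Prop := out = find_longest_retrostroke_alt s
instance (s : String) (out : String) : Decidable (Spec_find_longest_retrostroke s out) := by unfold Spec_find_longest_retrostroke; infer_instance

-- ===== CLAIM (what is proved, stated in full; the proofs are below) =====
def Claim_equal_find_longest_retrostroke : Prop := ∀ (s : String), Dom_find_longest_retrostroke s → Spec_find_longest_retrostroke s (find_longest_retrostroke s)

-- ===== LEMMAS AND PROOFS =====
-- proof-side views of the two folds
def pvStA (cs : List Char) (m : Nat) : List Int :=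
  (PySem.List.pyRange 1 (m : Int) 1).foldl
    (fun pi i =>
      let j0 := PySem.List.pyGetD pi (i - 1) 0
      let j1 := pvChase cs pi i cs.length j0
      let j := if PySem.List.pyGetD cs i ' ' = PySem.List.pyGetD cs j1 ' ' then j1 + 1 else j1
      PySem.List.pySetD pi i j)
    (List.replicate cs.length 0)

def pvSt (cs : List Char) (m : Nat) : List Int × List Int × Int :=
  (PySem.List.pyRange 1 (m : Int) 1).foldl (pvStepB cs) ([0], [0], 0)

theorem pvStA_succ (cs : List Char) (m : Nat) (hm : 1 ≤ m) :
    pvStA cs (m + 1) =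
      (let pi := pvStA cs m
       let j0 := PySem.List.pyGetD pi ((m : Int) - 1) 0
       let j1 := pvChase cs pi (m : Int) cs.length j0
       let j := if PySem.List.pyGetD cs (m : Int) ' ' = PySem.List.pyGetD cs j1 ' ' then j1 + 1 else j1
       PySem.List.pySetD pi (m : Int) j) := by
  unfold pvStA
  rw [show ((m + 1 : Nat) : Int) = (m : Int) + 1 by push_cast; ring,
    PySem.List.pyRange_one_succ_right (by exact_mod_cast hm), List.foldl_append]
  rfl

theorem pvSt_succ (cs : List Char) (m : Nat) (hm : 1 ≤ m) :
    pvSt cs (m + 1) = pvStepB cs (pvSt cs m) (m : Int) := by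
  unfold pvSt
  rw [show ((m + 1 : Nat) : Int) = (m : Int) + 1 by push_cast; ring,
    PySem.List.pyRange_one_succ_right (by exact_mod_cast hm), List.foldl_append]
  rfl

theorem pvSt_one (cs : List Char) : pvSt cs 1 = ([0], [0], 0) := by
  unfold pvSt
  rw [show ((1 : Nat) : Int) = 1 by norm_num, PySem.List.pyRange_one_eq_nil (by norm_num)]
  rfl

-- the while loop reads pi only below M: lists agreeing below M chase identically, and the
-- result stays in [0, j]
theorem pvChase_congr (cs : List Char) (pi1 pi2 : List Int) (i M : Int)
    (hag : ∀ t : Int, 0 ≤ t → t < M → PySem.List.pyGetD pi1 t 0 = PySem.List.pyGetD pi2 t 0)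
    (hinv : ∀ t : Int, 0 ≤ t → t < M → 0 ≤ PySem.List.pyGetD pi1 t 0 ∧ PySem.List.pyGetD pi1 t 0 ≤ t) :
    ∀ (f : Nat) (j : Int), 0 ≤ j → j < M →
      pvChase cs pi1 i f j = pvChase cs pi2 i f j ∧
      0 ≤ pvChase cs pi1 i f j ∧ pvChase cs pi1 i f j ≤ j := by
  intro f
  induction f with
  | zero => intro j h0 _; exact ⟨rfl, h0, le_refl _⟩
  | succ f ih =>
    intro j h0 hM
    by_cases hc : j > 0 ∧ PySem.List.pyGetD cs i ' ' ≠ PySem.List.pyGetD cs j ' '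
    · have h1 : (0 : Int) ≤ j - 1 := by omega
      have h2 : j - 1 < M := by omega
      have hb := hinv (j - 1) h1 h2
      obtain ⟨e, r0, rle⟩ := ih (PySem.List.pyGetD pi1 (j - 1) 0) hb.1 (by omega)
      simp only [pvChase, if_pos hc]
      exact ⟨e.trans (by rw [hag (j - 1) h1 h2]), r0, by omega⟩
    · have e1 : pvChase cs pi1 i (f + 1) j = j := by simp only [pvChase, if_neg hc]
      have e2 : pvChase cs pi2 i (f + 1) j = j := by simp only [pvChase, if_neg hc]
      rw [e1, e2]
      exact ⟨rfl, h0, le_refl _⟩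

-- Int-index read below the length of the left part of an append
theorem pvGetD_append_left (xs ys : List Int) (t : Int) (h0 : 0 ≤ t) (h : t < (xs.length : Int)) :
    PySem.List.pyGetD (xs ++ ys) t 0 = PySem.List.pyGetD xs t 0 := by
  have : t = ((t.toNat : Nat) : Int) := by omega
  rw [this, PySem.List.pyGetD_natCast, PySem.List.pyGetD_natCast,
    List.getD_append _ _ _ _ (by omega)]


theorem pvGetD_append_at (xs ys : List Int) (x : Int) (t : Int) (h : t = (xs.length : Int)) :
    PySem.List.pyGetD (xs ++ x :: ys) t 0 = x := by
  subst h
  rw [PySem.List.pyGetD_natCast, List.getD_append_right _ _ _ _ (le_refl _)]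
  simp

theorem pvStepB_shape (cs : List Char) (st : List Int × List Int × Int) (i : Int) :
    ∃ a b, pvStepB cs st i =
      (st.1 ++ [a], st.2.1 ++ [b],
        if PySem.List.pyGetD (st.2.1 ++ [b]) i 0 < a then i + 1 else st.2.2) :=
  ⟨_, _, rfl⟩

-- states grow by appending: any later state extends an earlier one
theorem pvSt_prefix (cs : List Char) (m M : Nat) (hm : 1 ≤ m) (hmM : m ≤ M) :
    ∃ u v, (pvSt cs M).1 = (pvSt cs m).1 ++ u ∧ (pvSt cs M).2.1 = (pvSt cs m).2.1 ++ v := by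
  induction M, hmM using Nat.le_induction with
  | base => exact ⟨[], [], by simp, by simp⟩
  | succ M hM ih =>
    obtain ⟨u, v, hu, hv⟩ := ih
    obtain ⟨a, b, hs⟩ := pvStepB_shape cs (pvSt cs M) (M : Int)
    rw [pvSt_succ cs M (by omega), hs]
    exact ⟨u ++ [a], v ++ [b], by simp [hu], by simp [hv]⟩

-- the combined invariant of B's forward loop, plus 'A's array state = B's list ++ zeros'
theorem pvInv (cs : List Char) : ∀ m : Nat, 1 ≤ m → m ≤ cs.length →
    ((pvSt cs m).1.length = m) ∧ ((pvSt cs m).2.1.length = m) ∧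
    (∀ t : Nat, t < m → 0 ≤ PySem.List.pyGetD (pvSt cs m).1 (t : Int) 0 ∧
        PySem.List.pyGetD (pvSt cs m).1 (t : Int) 0 ≤ (t : Int)) ∧
    (∀ t : Nat, t < m → PySem.List.pyGetD (pvSt cs m).2.1 (t : Int) 0 =
        (if PySem.List.pyGetD (pvSt cs m).1 (t : Int) 0 = 0 then 0
         else 1 + PySem.List.pyGetD (pvSt cs m).2.1 (PySem.List.pyGetD (pvSt cs m).1 (t : Int) 0 - 1) 0)) ∧
    (pvStA cs m = (pvSt cs m).1 ++ List.replicate (cs.length - m) 0) := by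
  intro m hm
  induction m, hm using Nat.le_induction with
  | base =>
    intro hn
    rw [pvSt_one]
    refine ⟨rfl, rfl, ?_, ?_, ?_⟩
    · intro t ht
      have : t = 0 := by omega
      subst this
      norm_num [PySem.List.pyGetD_zero_cons]
    · intro t ht
      have : t = 0 := by omega
      subst this
      norm_num [PySem.List.pyGetD_zero_cons]
    · unfold pvStA
      rw [show ((1 : Nat) : Int) = 1 by norm_num, PySem.List.pyRange_one_eq_nil (by norm_num)]
      obtain ⟨k, hk⟩ : ∃ k, cs.length = 1 + k := ⟨cs.length - 1, by omega⟩
      rw [Nat.add_comm] at hk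
      simp [hk, List.foldl, List.replicate_succ]
  | succ m hm ih =>
    intro hn
    obtain ⟨hl1, hl2, hb, hc, he⟩ := ih (by omega)
    obtain ⟨a, b, hs⟩ := pvStepB_shape cs (pvSt cs m) (m : Int)
    -- Int-indexed forms of the invariants
    have hbI : ∀ t : Int, 0 ≤ t → t < (m : Int) →
        0 ≤ PySem.List.pyGetD (pvSt cs m).1 t 0 ∧ PySem.List.pyGetD (pvSt cs m).1 t 0 ≤ t := by
      intro t h0 hM
      have h := hb t.toNat (by omega)
      rw [show ((t.toNat : Nat) : Int) = t by omega] at h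
      exact h
    have hagI : ∀ t : Int, 0 ≤ t → t < (m : Int) →
        PySem.List.pyGetD ((pvSt cs m).1 ++ List.replicate (cs.length - m) 0) t 0 =
          PySem.List.pyGetD (pvSt cs m).1 t 0 := by
      intro t h0 hM
      exact pvGetD_append_left _ _ t h0 (by omega)
    have hinvI : ∀ t : Int, 0 ≤ t → t < (m : Int) →
        0 ≤ PySem.List.pyGetD ((pvSt cs m).1 ++ List.replicate (cs.length - m) 0) t 0 ∧
          PySem.List.pyGetD ((pvSt cs m).1 ++ List.replicate (cs.length - m) 0) t 0 ≤ t := by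
      intro t h0 hM
      rw [hagI t h0 hM]
      exact hbI t h0 hM
    -- the value j appended to pi, with its bounds
    have hpine : (pvSt cs m).1 ≠ [] := by
      intro h
      rw [h] at hl1
      simp at hl1
      omega
    have e0 : PySem.List.pyGetD (pvSt cs m).1 (-1) 0 =
        PySem.List.pyGetD (pvSt cs m).1 (((m - 1 : Nat)) : Int) 0 := by
      rw [PySem.List.pyGetD_neg_one _ _ hpine, PySem.List.pyGetD_natCast,
        List.getD_eq_getElem _ _ (by omega), List.getLast_eq_getElem]
      congr 1
      omega
    have hj0b := hb (m - 1) (by omega)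
    have hj00 : 0 ≤ PySem.List.pyGetD (pvSt cs m).1 (-1) 0 := by rw [e0]; exact hj0b.1
    have hj0m : PySem.List.pyGetD (pvSt cs m).1 (-1) 0 < (m : Int) := by
      rw [e0]
      have := hj0b.2
      omega
    obtain ⟨hch, hch0, hchle⟩ := pvChase_congr cs
      ((pvSt cs m).1 ++ List.replicate (cs.length - m) 0) (pvSt cs m).1 (m : Int) (m : Int)
      hagI hinvI cs.length (PySem.List.pyGetD (pvSt cs m).1 (-1) 0) hj00 hj0m
    set j1 := pvChase cs (pvSt cs m).1 (m : Int) cs.length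
      (PySem.List.pyGetD (pvSt cs m).1 (-1) 0) with hj1def
    set j := (if PySem.List.pyGetD cs (m : Int) ' ' = PySem.List.pyGetD cs j1 ' '
      then j1 + 1 else j1) with hjdef
    set gv := (if j > 0 then 1 + PySem.List.pyGetD (pvSt cs m).2.1 (j - 1) 0 else 0) with hgvdef
    have hj1b : 0 ≤ j1 ∧ j1 ≤ (m : Int) - 1 := by
      rw [← hch]
      refine ⟨hch0, le_trans hchle ?_⟩
      rw [e0]
      have := hj0b.2
      omega
    have hjb : 0 ≤ j ∧ j ≤ (m : Int) := by
      rw [hjdef]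
      split_ifs <;> omega
    have hstep : pvSt cs (m + 1) =
        ((pvSt cs m).1 ++ [j], (pvSt cs m).2.1 ++ [gv],
          if PySem.List.pyGetD ((pvSt cs m).2.1 ++ [gv]) (m : Int) 0 < j then (m : Int) + 1
          else (pvSt cs m).2.2) := by
      rw [pvSt_succ cs m (by omega)]
      rfl
    refine ⟨?_, ?_, ?_, ?_, ?_⟩
    · rw [hstep]
      simp [hl1]
    · rw [hstep]
      simp [hl2]
    · intro t ht
      rw [hstep]
      dsimp only
      by_cases htm : t < m
      · rw [pvGetD_append_left _ _ _ (by positivity) (by rw [hl1]; exact_mod_cast htm)]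
        exact hb t htm
      · have : t = m := by omega
        subst this
        rw [pvGetD_append_at _ [] j _ (by rw [hl1])]
        exact hjb
    · intro t ht
      rw [hstep]
      dsimp only
      by_cases htm : t < m
      · rw [pvGetD_append_left _ _ _ (by positivity) (by rw [hl2]; exact_mod_cast htm),
          pvGetD_append_left _ _ _ (by positivity) (by rw [hl1]; exact_mod_cast htm)]
        have hbt := hb t htm
        rw [hc t htm]
        by_cases hz : PySem.List.pyGetD (pvSt cs m).1 (t : Int) 0 = 0
        · simp [hz]
        · rw [if_neg hz, if_neg hz]
          congr 1
          rw [pvGetD_append_left _ _ _ (by omega) (by rw [hl2]; omega)]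
      · have : t = m := by omega
        subst this
        rw [pvGetD_append_at _ [] gv _ (by rw [hl2]),
          pvGetD_append_at _ [] j _ (by rw [hl1])]
        by_cases hjz : j = 0
        · rw [hgvdef, if_neg (by omega), if_pos hjz]
        · rw [hgvdef, if_pos (by omega), if_neg hjz]
          congr 1
          rw [pvGetD_append_left _ _ _ (by omega) (by rw [hl2]; omega)]
    · rw [pvStA_succ cs m (by omega), he]
      dsimp only
      have eA0 : PySem.List.pyGetD ((pvSt cs m).1 ++ List.replicate (cs.length - m) 0)
          ((m : Int) - 1) 0 = PySem.List.pyGetD (pvSt cs m).1 (-1) 0 := by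
        rw [show (m : Int) - 1 = ((m - 1 : Nat) : Int) by omega,
          hagI _ (by omega) (by omega), ← e0]
      rw [eA0, hch, PySem.List.pySetD_natCast]
      obtain ⟨k, hk⟩ : ∃ k, cs.length - m = k + 1 := ⟨cs.length - m - 1, by omega⟩
      rw [hk, List.replicate_succ, List.set_append_right _ _ (by omega), hl1,
        Nat.sub_self, List.set_cons_zero, hstep]
      have hk2 : cs.length - (m + 1) = k := by omega
      simp only [hk2, List.append_assoc, List.cons_append, List.nil_append]
      rw [← hjdef]
  


theorem pvChainA_zero (pi : List Int) (f : Nat) (rc : Int) : pvChainA pi f rc 0 = rc := by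
  cases f <;> simp [pvChainA]

-- A's repeat_count while loop computes exactly the DP value recorded in G
theorem pvChainA_eq (pi G : List Int)
    (hb : ∀ t : Nat, t < pi.length → 0 ≤ PySem.List.pyGetD pi (t : Int) 0 ∧
        PySem.List.pyGetD pi (t : Int) 0 ≤ (t : Int))
    (hc : ∀ t : Nat, t < pi.length → PySem.List.pyGetD G (t : Int) 0 =
        (if PySem.List.pyGetD pi (t : Int) 0 = 0 then 0
         else 1 + PySem.List.pyGetD G (PySem.List.pyGetD pi (t : Int) 0 - 1) 0)) :
    ∀ (f : Nat) (j rc : Int), 0 ≤ j → j ≤ (pi.length : Int) → j.toNat ≤ f →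
      pvChainA pi f rc j = rc + (if j = 0 then 0 else 1 + PySem.List.pyGetD G (j - 1) 0) := by
  intro f
  induction f with
  | zero =>
    intro j rc h0 _ hf
    have : j = 0 := by omega
    subst this
    simp [pvChainA]
  | succ f ih =>
    intro j rc h0 hN hf
    by_cases hj : j > 0
    · have ht : (j - 1).toNat < pi.length := by omega
      have hcast : (((j - 1).toNat : Nat) : Int) = j - 1 := by omega
      have hbt := hb (j - 1).toNat ht
      have hct := hc (j - 1).toNat ht
      rw [hcast] at hbt hct
      have e : pvChainA pi (f + 1) rc j =
          pvChainA pi f (rc + 1) (PySem.List.pyGetD pi (j - 1) 0) := by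
        simp only [pvChainA, if_pos hj]
      rw [e, ih _ _ hbt.1 (by omega) (by omega), if_neg (by omega : ¬ j = 0), hct]
      split_ifs <;> ring
    · have : j = 0 := by omega
      subst this
      rw [pvChainA_zero]
      simp

-- reads below an earlier state's length are stable across later states
theorem pvSt_stable (cs : List Char) (m M : Nat) (hm : 1 ≤ m) (hmM : m ≤ M)
    (hM : M ≤ cs.length) (t : Nat) (ht : t < m) :
    PySem.List.pyGetD (pvSt cs M).1 (t : Int) 0 = PySem.List.pyGetD (pvSt cs m).1 (t : Int) 0 ∧
    PySem.List.pyGetD (pvSt cs M).2.1 (t : Int) 0 = PySem.List.pyGetD (pvSt cs m).2.1 (t : Int) 0 := by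
  obtain ⟨hl1, hl2, _, _, _⟩ := pvInv cs m hm (le_trans hmM hM)
  obtain ⟨u, v, hu, hv⟩ := pvSt_prefix cs m M hm hmM
  rw [hu, hv]
  constructor
  · exact pvGetD_append_left _ _ _ (by positivity) (by rw [hl1]; exact_mod_cast ht)
  · exact pvGetD_append_left _ _ _ (by positivity) (by rw [hl2]; exact_mod_cast ht)

-- A's backward scan with early return equals 'slice up to B's running best'
theorem pvLoopA_eq (cs : List Char) (hn : 1 ≤ cs.length) :
    ∀ m : Nat, 1 ≤ m → m ≤ cs.length →
      pvLoopA cs (pvSt cs cs.length).1 m =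
        PySem.List.slice cs none (some ((pvSt cs m).2.2)) := by
  intro m hm
  induction m, hm using Nat.le_induction with
  | base =>
    intro _
    have h0 : PySem.List.pyGetD (pvSt cs cs.length).1 ((0 : Nat) : Int) 0 = 0 := by
      rw [(pvSt_stable cs 1 cs.length (by omega) hn le_rfl 0 (by omega)).1, pvSt_one]
      simp [PySem.List.pyGetD_zero_cons]
    simp only [pvLoopA, Nat.cast_zero] at *
    rw [h0, pvChainA_zero, if_neg (by omega), pvSt_one]
    have : PySem.List.slice cs none (some (0 : Int)) = [] := by
      rw [PySem.List.slice_to cs le_rfl]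
      simp
    rw [this]
  | succ m hm ih =>
    intro hn1
    obtain ⟨hL1, hL2, hB, hC, _⟩ := pvInv cs cs.length (by omega) le_rfl
    obtain ⟨hl1, hl2, _, _, _⟩ := pvInv cs m hm (by omega)
    obtain ⟨a, b, hs⟩ := pvStepB_shape cs (pvSt cs m) (m : Int)
    have hstep := (pvSt_succ cs m hm).trans hs
    -- the entry of pi at index m is a, of G is b
    have hpa : PySem.List.pyGetD (pvSt cs cs.length).1 ((m : Nat) : Int) 0 = a := by
      rw [(pvSt_stable cs (m + 1) cs.length (by omega) hn1 le_rfl m (by omega)).1, hstep]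
      exact pvGetD_append_at _ [] a _ (by rw [hl1])
    have hgb : PySem.List.pyGetD (pvSt cs cs.length).2.1 ((m : Nat) : Int) 0 = b := by
      rw [(pvSt_stable cs (m + 1) cs.length (by omega) hn1 le_rfl m (by omega)).2, hstep]
      exact pvGetD_append_at _ [] b _ (by rw [hl2])
    have hbm := hB m (by omega)
    -- the chain count at index m is the stored DP value
    have hrc : pvChainA (pvSt cs cs.length).1 (pvSt cs cs.length).1.length 0
        (PySem.List.pyGetD (pvSt cs cs.length).1 ((m : Nat) : Int) 0) = b := by
      rw [pvChainA_eq (pvSt cs cs.length).1 (pvSt cs cs.length).2.1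
        (by rw [hL1]; exact hB) (by rw [hL1]; exact hC) _ _ _ hbm.1
        (by rw [hL1]; omega) (by rw [hL1]; omega)]
      rw [← hgb, hC m (by omega)]
      simp
    simp only [pvLoopA]
    rw [hrc, hpa, hstep]
    dsimp only
    rw [pvGetD_append_at _ [] b _ (by rw [hl2])]
    by_cases hcond : b < a
    · rw [if_pos hcond, if_pos hcond]
    · rw [if_neg hcond, if_neg hcond]
      exact ih (by omega)

theorem pv_final : ∀ (s : String), find_longest_retrostroke s = find_longest_retrostroke_alt s := by
  intro s
  unfold find_longest_retrostroke find_longest_retrostroke_alt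
  by_cases h : s.toList = []
  · rw [h]
    rfl
  · have hn : 1 ≤ s.toList.length := List.length_pos_iff.mpr h
    have hPF : pvPrefixFun s.toList = (pvSt s.toList s.toList.length).1 := by
      obtain ⟨_, _, _, _, he⟩ := pvInv s.toList s.toList.length hn le_rfl
      rw [show pvPrefixFun s.toList = pvStA s.toList s.toList.length from rfl, he]
      simp
    show String.ofList (pvLoopA s.toList (pvPrefixFun s.toList) s.toList.length) = _
    rw [hPF, pvLoopA_eq s.toList hn s.toList.length hn le_rfl]
    rw [if_neg (by simp [h])]
    rfl

-- ===== VERDICT (by name: the statement is the Claim_ definition above) =====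
theorem find_longest_retrostroke_spec : Claim_equal_find_longest_retrostroke := by
  intro s _
  exact pv_final s
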